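-- pv_equiv track=rewrite | github.com/jcolinpatrick/kryptos | scripts/geometric_null_mask_part3.py | check_periodic_consistency
-- ===== SOURCE A (Python) =====
-- def check_periodic_consistency(keystream, max_period=26):
--     """Check if keystream values are consistent with a periodic key.
--     Returns list of (period, conflicts) for each period.
--     """
--     positions = sorted(keystream.keys())
--     results = []
--     for p in range(1, max_period + 1):
--         # Group by position mod period
--         groups = {}
--         for pos in positions:
--             r = pos % p
--             groups.setdefault(r, []).append((pos, keystream[pos]))
--
--         conflicts = 0
--         for r, vals in groups.items():
--             key_vals = set(v for _, v in vals)
--             if len(key_vals) > 1: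
--                 conflicts += 1
--
--         consistent_residues = sum(1 for vals in groups.values() if len(set(v for _, v in vals)) == 1)
--         total_residues = len(groups)
--         results.append((p, conflicts, consistent_residues, total_residues))
--
--     return results
-- ===== SOURCE B (Python) =====
-- def check_periodic_consistency(keystream, max_period=26):
--     """Check if keystream values are consistent with a periodic key.
--     Returns list of (period, conflicts, consistent_residues, total_residues) for each period.
--     """
--     positions = sorted(keystream)
--     results = []
--     for p in range(1, max_period + 1):
--         # single pass: residue -> (first value seen, conflict flag)
--         state = {}
--         for pos in positions:
--             r = pos % p
--             v = keystream[pos]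
--             if r in state:
--                 first, flag = state[r]
--                 if not flag and v != first:
--                     state[r] = (first, True)
--             else:
--                 state[r] = (v, False)
--         total = len(state)
--         conflicts = sum(1 for _, flag in state.values() if flag)
--         results.append((p, conflicts, total - conflicts, total))
--     return results
-- ===== Notes on version B (the rewrite author's own statement) =====
-- stated objective: simpler
-- what changed: A builds, per period, a dict of residue -> full list of (pos, value) pairs and then rescans every group twice (a set-build per group for conflicts and again for consistent residues); B keeps only (first value seen, conflict flag) per residue in one pass and derives consistent_residues = total - conflicts from the fact that each nonempty residue class is either all-equal or conflicting.
import Mathlib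
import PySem

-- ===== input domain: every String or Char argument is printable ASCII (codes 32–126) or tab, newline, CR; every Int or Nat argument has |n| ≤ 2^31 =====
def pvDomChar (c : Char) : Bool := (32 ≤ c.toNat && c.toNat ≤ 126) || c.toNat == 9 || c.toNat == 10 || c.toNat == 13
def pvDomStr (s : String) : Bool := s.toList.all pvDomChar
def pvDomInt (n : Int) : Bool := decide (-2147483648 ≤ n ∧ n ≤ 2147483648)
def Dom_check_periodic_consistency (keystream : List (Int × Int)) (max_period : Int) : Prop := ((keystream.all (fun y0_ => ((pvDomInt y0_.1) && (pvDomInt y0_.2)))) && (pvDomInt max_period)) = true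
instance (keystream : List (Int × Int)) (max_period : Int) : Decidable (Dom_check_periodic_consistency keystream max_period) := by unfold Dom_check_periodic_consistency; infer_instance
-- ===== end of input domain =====

-- B replaces A's per-period group-then-rescan (build residue -> list of values, then scan each
-- group's value set twice) by a single pass keeping only (first value, conflict flag) per residue
-- and deriving consistent_residues = total - conflicts; objective: simpler (same asymptotic cost).

-- ===== PORT A =====
-- A-side helper: the body of A's per-period loop (grouping pass, then the two scans over the groups).
-- keystream[pos] is ported as getD with default 0: pos is drawn from the dict's own keys, so the
-- KeyError branch of Python's lookup is unreachable and the default is never used.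
def aGroups (ks : PySem.Dict Int Int) (positions : List Int) (p : Int) :
    PySem.Dict Int (List (Int × Int)) :=
  positions.foldl
    (fun g pos => g.modify (PySem.Int.mod pos p) [] (fun vs => vs ++ [(pos, ks.getD pos 0)]))
    PySem.Dict.empty

def aRow (ks : PySem.Dict Int Int) (positions : List Int) (p : Int) : Int × Int × Int × Int :=
  let groups := aGroups ks positions p
  let conflicts : Int := groups.items.foldl
    (fun acc rv => if PySem.Set.len (PySem.Set.ofList (rv.2.map (fun q => q.2))) > 1 then acc + 1 else acc) 0
  let consistent_residues : Int :=
    (((groups.values.filter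
        (fun vals => PySem.Set.len (PySem.Set.ofList (vals.map (fun q => q.2))) == 1))).map
      (fun _ => (1 : Int))).sum
  let total_residues : Int := (groups.size : Int)
  (p, conflicts, consistent_residues, total_residues)

def check_periodic_consistency (keystream : List (Int × Int)) (max_period : Int) :
    List (Int × Int × Int × Int) :=
  let ks := PySem.Dict.ofList keystream
  let positions := PySem.List.sorted ks.keys (fun x => x) false
  (PySem.List.pyRange 1 (max_period + 1) 1).foldl
    (fun results p => results ++ [aRow ks positions p]) []

-- ===== PORT B =====
-- B-side helper: one step of B's single pass (residue -> (first value seen, conflict flag)).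
def bStep (ks : PySem.Dict Int Int) (p : Int) (st : PySem.Dict Int (Int × Bool)) (pos : Int) :
    PySem.Dict Int (Int × Bool) :=
  match st.get? (PySem.Int.mod pos p) with
  | some q => if !q.2 && (ks.getD pos 0 != q.1) then st.insert (PySem.Int.mod pos p) (q.1, true) else st
  | none => st.insert (PySem.Int.mod pos p) (ks.getD pos 0, false)

def bRow (ks : PySem.Dict Int Int) (positions : List Int) (p : Int) : Int × Int × Int × Int :=
  let st := positions.foldl (bStep ks p) PySem.Dict.empty
  let total : Int := (st.size : Int)
  let conflicts : Int := ((st.values.filter (fun q => q.2)).map (fun _ => (1 : Int))).sum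
  (p, conflicts, total - conflicts, total)

def check_periodic_consistency_alt (keystream : List (Int × Int)) (max_period : Int) :
    List (Int × Int × Int × Int) :=
  let ks := PySem.Dict.ofList keystream
  let positions := PySem.List.sorted ks.keys (fun x => x) false
  (PySem.List.pyRange 1 (max_period + 1) 1).foldl
    (fun results p => results ++ [bRow ks positions p]) []

-- ===== PRECONDITION & SPEC =====
def Spec_check_periodic_consistency (keystream : List (Int × Int)) (max_period : Int) (out : List (Int × Int × Int × Int)) : Prop := out = check_periodic_consistency_alt keystream max_period
instance (keystream : List (Int × Int)) (max_period : Int) (out : List (Int × Int × Int × Int)) : Decidable (Spec_check_periodic_consistency keystream max_period out) := by unfold Spec_check_periodic_consistency; infer_instance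

-- ===== CLAIM (what is proved, stated in full; the proofs are below) =====
def Claim_equal_check_periodic_consistency : Prop := ∀ (keystream : List (Int × Int)) (max_period : Int), Dom_check_periodic_consistency keystream max_period → Spec_check_periodic_consistency keystream max_period (check_periodic_consistency keystream max_period)

-- ===== LEMMAS AND PROOFS =====

-- the values seen at residue class r, in position order
def bWs (ks : PySem.Dict Int Int) (p : Int) (l : List Int) (r : Int) : List Int :=
  (l.filter (fun pos => PySem.Int.mod pos p == r)).map (fun pos => ks.getD pos 0)

theorem bWs_append (ks : PySem.Dict Int Int) (p : Int) (l : List Int) (pos r : Int) :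
    bWs ks p (l ++ [pos]) r =
      bWs ks p l r ++ (if PySem.Int.mod pos p = r then [ks.getD pos 0] else []) := by
  simp only [bWs, List.filter_append, List.map_append]
  congr 1
  by_cases h : PySem.Int.mod pos p = r
  · simp [List.filter, h]
  · have hb : (PySem.Int.mod pos p == r) = false := by simp [h]
    simp [List.filter, hb, h]

theorem aGroups_keys (ks : PySem.Dict Int Int) (l : List Int) (p : Int) :
    (aGroups ks l p).keys = PySem.Set.ofList (l.map (fun pos => PySem.Int.mod pos p)) := by
  unfold aGroups
  rw [PySem.Dict.keys_foldl_modify_key l (fun pos => PySem.Int.mod pos p) []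
    (fun _ pos => fun vs => vs ++ [(pos, ks.getD pos 0)]) PySem.Dict.empty]
  simp [PySem.Set.update_nil_left]

theorem aGroups_getD (ks : PySem.Dict Int Int) (l : List Int) (p r : Int) :
    (aGroups ks l p).getD r [] =
      (l.filter (fun pos => PySem.Int.mod pos p == r)).map (fun pos => (pos, ks.getD pos 0)) := by
  have hmap : aGroups ks l p =
      (l.map (fun pos => (PySem.Int.mod pos p, (pos, ks.getD pos 0)))).foldl
        (fun d q => d.modify q.1 [] (fun vs => vs ++ [q.2])) PySem.Dict.empty := by
    unfold aGroups; rw [List.foldl_map]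
  rw [hmap, PySem.Dict.getD_foldl_modify_append]
  simp only [List.filter_map, List.map_map, Function.comp_def, PySem.Dict.getD_empty, List.nil_append]

-- invariant of B's single pass
theorem bFold_spec (ks : PySem.Dict Int Int) (p : Int) (l : List Int) :
    (l.foldl (bStep ks p) PySem.Dict.empty).keys
        = PySem.Set.ofList (l.map (fun pos => PySem.Int.mod pos p)) ∧
      ∀ r, (l.foldl (bStep ks p) PySem.Dict.empty).get? r =
        match bWs ks p l r with
        | [] => none
        | w :: t => some (w, t.any (fun x => x != w)) := by
  induction l using List.reverseRecOn with
  | nil =>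
    constructor
    · simp [PySem.Set.ofList_nil]
    · intro r; simp [bWs]
  | append_singleton l pos ih =>
    obtain ⟨ihk, ihg⟩ := ih
    set prev := l.foldl (bStep ks p) PySem.Dict.empty with hprev
    have hfold : (l ++ [pos]).foldl (bStep ks p) PySem.Dict.empty = bStep ks p prev pos := by
      rw [List.foldl_append]; rfl
    have hg0 := ihg (PySem.Int.mod pos p)
    cases hws : bWs ks p l (PySem.Int.mod pos p) with
    | nil =>
      rw [hws] at hg0
      have hnc : prev.contains (PySem.Int.mod pos p) = false := by
        rw [PySem.Dict.contains_eq_isSome_get?, hg0]; rfl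
      have hnm : PySem.Int.mod pos p ∉ PySem.Set.ofList (l.map (fun pos => PySem.Int.mod pos p)) := by
        rw [← ihk, ← PySem.Dict.get?_eq_none_iff_not_mem_keys]; exact hg0
      have hstep : bStep ks p prev pos = prev.insert (PySem.Int.mod pos p) (ks.getD pos 0, false) := by
        unfold bStep; rw [hg0]
      constructor
      · rw [hfold, hstep, PySem.Dict.keys_insert_of_not_contains _ _ hnc, ihk]
        rw [List.map_append, List.map_singleton, PySem.Set.ofList_append_singleton,
          PySem.Set.add_of_not_mem hnm]
      · intro r
        rw [hfold, hstep, bWs_append]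
        by_cases hr : r = PySem.Int.mod pos p
        · subst hr
          rw [PySem.Dict.get?_insert_self, hws]
          simp
        · rw [PySem.Dict.get?_insert_of_ne _ _ hr, ihg r]
          have : PySem.Int.mod pos p ≠ r := fun h => hr h.symm
          simp [this]
    | cons w t =>
      rw [hws] at hg0
      have hg0' : prev.get? (PySem.Int.mod pos p) = some (w, t.any (fun x => x != w)) := hg0
      have hc : prev.contains (PySem.Int.mod pos p) = true := by
        rw [PySem.Dict.contains_eq_isSome_get?, hg0']; rfl
      have hm : PySem.Int.mod pos p ∈ PySem.Set.ofList (l.map (fun pos => PySem.Int.mod pos p)) := by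
        rw [← ihk, ← PySem.Dict.contains_iff_mem_keys]; exact hc
      have hmapeq : PySem.Set.ofList ((l ++ [pos]).map (fun pos => PySem.Int.mod pos p))
          = PySem.Set.ofList (l.map (fun pos => PySem.Int.mod pos p)) := by
        rw [List.map_append, List.map_singleton, PySem.Set.ofList_append_singleton,
          PySem.Set.add_of_mem hm]
      have hstep : bStep ks p prev pos =
          if (!(t.any (fun x => x != w)) && (ks.getD pos 0 != w)) = true
          then prev.insert (PySem.Int.mod pos p) (w, true) else prev := by
        unfold bStep; rw [hg0']
      constructor
      · rw [hfold, hstep, hmapeq]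
        by_cases hb : (!(t.any (fun x => x != w)) && (ks.getD pos 0 != w)) = true
        · rw [if_pos hb, PySem.Dict.keys_insert_of_contains _ _ hc, ihk]
        · rw [if_neg hb, ihk]
      · intro r
        rw [hfold, hstep, bWs_append]
        by_cases hr : r = PySem.Int.mod pos p
        · subst hr
          rw [hws, if_pos rfl]
          by_cases hb : (!(t.any (fun x => x != w)) && (ks.getD pos 0 != w)) = true
          · rw [if_pos hb, PySem.Dict.get?_insert_self]
            have hne : (ks.getD pos 0 != w) = true := by
              rcases h2 : (ks.getD pos 0 != w) with _ | _ <;> simp [h2] at hb ⊢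
            simp [List.any_append, hne]
          · rw [if_neg hb, hg0']
            rcases h1 : (t.any (fun x => x != w)) with _ | _
            · have heq : (ks.getD pos 0 != w) = false := by
                rcases h2 : (ks.getD pos 0 != w) with _ | _ <;> simp [h1, h2] at hb ⊢
              simp [List.any_append, h1, heq]
            · simp [List.any_append, h1]
        · have hne2 : PySem.Int.mod pos p ≠ r := fun h => hr h.symm
          have hfilt : (if PySem.Int.mod pos p = r then [ks.getD pos 0] else []) = ([] : List Int) := by
            simp [hne2]
          rw [hfilt, List.append_nil]
          by_cases hb : (!(t.any (fun x => x != w)) && (ks.getD pos 0 != w)) = true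
          · rw [if_pos hb, PySem.Dict.get?_insert_of_ne _ _ hr, ihg r]
          · rw [if_neg hb, ihg r]

-- the bridge: |set(values)| > 1  iff  some later value differs from the first
theorem setlen_gt_one_iff (w : Int) (t : List Int) :
    PySem.Set.len (PySem.Set.ofList (w :: t)) > 1 ↔ (t.any (fun x => x != w)) = true := by
  rw [PySem.Set.ofList_cons]
  have hmem : ∀ y, y ∈ (PySem.Set.ofList t).discard w ↔ y ∈ t ∧ y ≠ w := by
    intro y; rw [PySem.Set.mem_discard, PySem.Set.mem_ofList]
  constructor
  · intro h
    have hlen : 0 < ((PySem.Set.ofList t).discard w).length := by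
      simp only [PySem.Set.len, List.length_cons] at h
      omega
    obtain ⟨y, hy⟩ := List.exists_mem_of_length_pos hlen
    rw [hmem] at hy
    simp only [List.any_eq_true, bne_iff_ne]
    exact ⟨y, hy.1, hy.2⟩
  · intro h
    simp only [List.any_eq_true, bne_iff_ne] at h
    obtain ⟨y, hy, hyw⟩ := h
    have : y ∈ (PySem.Set.ofList t).discard w := (hmem y).mpr ⟨hy, hyw⟩
    have hlen : 0 < ((PySem.Set.ofList t).discard w).length := List.length_pos_of_mem this
    simp only [PySem.Set.len, List.length_cons]
    omega

theorem setlen_eq_one_iff (w : Int) (t : List Int) :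
    (PySem.Set.len (PySem.Set.ofList (w :: t)) == 1) = !(t.any (fun x => x != w)) := by
  have h1 := setlen_gt_one_iff w t
  have hge : 1 ≤ PySem.Set.len (PySem.Set.ofList (w :: t)) := by
    rw [PySem.Set.ofList_cons]; simp only [PySem.Set.len, List.length_cons]; omega
  cases h : t.any (fun x => x != w) with
  | false =>
    have : ¬ PySem.Set.len (PySem.Set.ofList (w :: t)) > 1 := by rw [h1, h]; simp
    simp only [Bool.not_false, beq_iff_eq]
    omega
  | true =>
    have : PySem.Set.len (PySem.Set.ofList (w :: t)) > 1 := h1.mpr h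
    simp only [Bool.not_true, beq_eq_false_iff_ne, ne_eq]
    omega

-- a present residue class has a nonempty value list
theorem bWs_ne_nil (ks : PySem.Dict Int Int) (p : Int) (l : List Int) (r : Int)
    (h : r ∈ l.map (fun pos => PySem.Int.mod pos p)) : bWs ks p l r ≠ [] := by
  obtain ⟨pos, hpos, hr⟩ := List.mem_map.mp h
  have : pos ∈ l.filter (fun pos => PySem.Int.mod pos p == r) :=
    List.mem_filter.mpr ⟨hpos, by simp [hr]⟩
  simp only [bWs, ne_eq, List.map_eq_nil_iff]
  exact List.ne_nil_of_mem this

-- per-period row equality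
theorem row_eq (ks : PySem.Dict Int Int) (l : List Int) (p : Int) :
    aRow ks l p = bRow ks l p := by
  obtain ⟨hbk, hbg⟩ := bFold_spec ks p l
  set S := PySem.Set.ofList (l.map (fun pos => PySem.Int.mod pos p)) with hS
  set st := l.foldl (bStep ks p) PySem.Dict.empty with hst
  have hAnd : (aGroups ks l p).keys.Nodup := by rw [aGroups_keys]; exact PySem.Set.nodup_ofList _
  have hBnd : st.keys.Nodup := by rw [hbk]; exact PySem.Set.nodup_ofList _
  have hflag : ∀ r ∈ S, ∃ w t, bWs ks p l r = w :: t ∧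
      st.getD r (0, false) = (w, t.any (fun x => x != w)) := by
    intro r hr
    have hne := bWs_ne_nil ks p l r ((PySem.Set.mem_ofList _ _).mp hr)
    cases hws : bWs ks p l r with
    | nil => exact absurd hws hne
    | cons w t =>
      refine ⟨w, t, rfl, ?_⟩
      have := hbg r
      rw [hws] at this
      exact PySem.Dict.getD_of_get?_eq_some _ _ this
  have hcongr : ∀ r ∈ S,
      (decide (PySem.Set.len (PySem.Set.ofList (bWs ks p l r)) > 1)) = (st.getD r (0, false)).2 := by
    intro r hr
    obtain ⟨w, t, hws, hgd⟩ := hflag r hr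
    rw [hws, hgd]
    have h1 := setlen_gt_one_iff w t
    cases h : t.any (fun x => x != w) with
    | false => simpa [h] using h1
    | true => simpa [h] using h1.mpr h
  have hcongr' : ∀ r ∈ S,
      (PySem.Set.len (PySem.Set.ofList (bWs ks p l r)) == 1) = !(st.getD r (0, false)).2 := by
    intro r hr
    obtain ⟨w, t, hws, hgd⟩ := hflag r hr
    rw [hws, hgd, setlen_eq_one_iff]
  have hAitems : (aGroups ks l p).items = S.map (fun r => (r, (aGroups ks l p).getD r [])) := by
    rw [PySem.Dict.items_eq_map_keys _ hAnd [], aGroups_keys]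
  have hAvalsnd : ∀ r, ((aGroups ks l p).getD r []).map (fun q => q.2) = bWs ks p l r := by
    intro r; rw [aGroups_getD]; simp [bWs, List.map_map, Function.comp]
  have hBitems : st.items = S.map (fun r => (r, st.getD r (0, false))) := by
    rw [PySem.Dict.items_eq_map_keys _ hBnd (0, false), hbk]
  have hBvalues : st.values = S.map (fun r => st.getD r (0, false)) := by
    rw [PySem.Dict.values_eq_map_keys _ hBnd (0, false), hbk]
  have hAvalues : (aGroups ks l p).values = S.map (fun r => (aGroups ks l p).getD r []) := by
    rw [PySem.Dict.values_eq_map_keys _ hAnd [], aGroups_keys]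
  -- the three counts, reduced to countP over S
  have hAconf : (aGroups ks l p).items.foldl
      (fun acc rv => if PySem.Set.len (PySem.Set.ofList (rv.2.map (fun q => q.2))) > 1 then acc + 1 else acc) (0 : Int)
      = (S.countP (fun r => (st.getD r (0, false)).2) : Int) := by
    rw [PySem.List.foldl_ite_add_one, hAitems, List.countP_map, zero_add]
    congr 1
    apply List.countP_congr
    intro r hr
    simp only [Function.comp_apply]
    rw [hAvalsnd r, hcongr r hr]
  have hAcons : ((((aGroups ks l p).values.filter
      (fun vals => PySem.Set.len (PySem.Set.ofList (vals.map (fun q => q.2))) == 1))).map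
      (fun _ => (1 : Int))).sum
      = (S.countP (fun r => !(st.getD r (0, false)).2) : Int) := by
    rw [PySem.List.sum_map_const_int, hAvalues, List.filter_map, List.length_map,
      ← List.countP_eq_length_filter, mul_one]
    congr 1
    apply List.countP_congr
    intro r hr
    simp only [Function.comp_apply]
    rw [hAvalsnd r, hcongr' r hr]
  have hBconf : ((st.values.filter (fun q => q.2)).map (fun _ => (1 : Int))).sum
      = (S.countP (fun r => (st.getD r (0, false)).2) : Int) := by
    rw [PySem.List.sum_map_const_int, hBvalues, List.filter_map, List.length_map,
      ← List.countP_eq_length_filter, mul_one]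
    rfl
  have hAsize : (aGroups ks l p).size = S.length := by
    show (aGroups ks l p).items.length = S.length
    rw [hAitems, List.length_map]
  have hBsize : st.size = S.length := by
    show st.items.length = S.length
    rw [hBitems, List.length_map]
  have hsplit := List.length_eq_countP_add_countP (fun r => (st.getD r (0, false)).2) (l := S)
  have hnot : S.countP (fun a => decide ¬((fun r => (st.getD r (0, false)).2) a = true))
      = S.countP (fun r => !(st.getD r (0, false)).2) := by
    apply List.countP_congr
    intro r _
    simp
  unfold aRow bRow
  simp only [← hst]
  rw [hAconf, hAcons, hBconf, hAsize, hBsize]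
  have : (S.countP (fun r => !(st.getD r (0, false)).2) : Int)
      = (S.length : Int) - (S.countP (fun r => (st.getD r (0, false)).2) : Int) := by
    rw [hnot] at hsplit
    omega
  rw [this]

-- ===== VERDICT (by name: the statement is the Claim_ definition above) =====
theorem check_periodic_consistency_spec : Claim_equal_check_periodic_consistency := by
  intro keystream max_period _
  show check_periodic_consistency keystream max_period
      = check_periodic_consistency_alt keystream max_period
  simp only [check_periodic_consistency, check_periodic_consistency_alt,
    PySem.List.foldl_append_singleton_eq_map, List.nil_append]
  exact List.map_congr_left (fun p _ => row_eq _ _ p)
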